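-- pv_equiv track=rewrite | github.com/AkimuneKawa/AtCoder | ABC/ABC189/D.py | f
-- ===== SOURCE A (Python) =====
-- def f(s):
--     if len(s) == 1:
--         if s[0] == "AND":
--             return 1
--         else:
--             return 3
--     elif len(s) > 1:
--         if s[-1] == "AND":
--             return f(s[:-1])
--         else:
--             return 2 ** (len(s)) + f(s[:-1])
-- ===== SOURCE B (Python) =====
-- def f(s):
--     if not s:
--         return None
--     total = 1 if s[0] == "AND" else 3
--     for i in range(1, len(s)):
--         if s[i] != "AND":
--             total += 2 ** (i + 1)
--     return total
-- ===== Notes on version B (the rewrite author's own statement) =====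
-- stated objective: simpler
-- what changed: Replaces the last-element-stripping recursion (which copies s[:-1] at every step) with a single forward loop that accumulates 2**(i+1) for each non-AND operator.
import Mathlib
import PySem

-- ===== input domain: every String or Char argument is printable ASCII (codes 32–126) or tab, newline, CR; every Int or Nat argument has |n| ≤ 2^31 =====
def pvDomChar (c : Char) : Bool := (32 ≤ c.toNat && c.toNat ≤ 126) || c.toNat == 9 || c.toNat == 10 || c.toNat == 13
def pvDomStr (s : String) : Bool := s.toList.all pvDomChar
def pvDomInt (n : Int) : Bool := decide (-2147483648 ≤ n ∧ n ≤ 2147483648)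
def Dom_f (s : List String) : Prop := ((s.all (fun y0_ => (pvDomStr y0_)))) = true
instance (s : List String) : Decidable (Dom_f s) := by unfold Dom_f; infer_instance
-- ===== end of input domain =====

-- B replaces A's last-element-stripping recursion with one forward accumulating loop (simpler, no list copies).

-- ===== PORT A =====
def f (s : List String) : Int :=
  if s.length = 1 then
    (if PySem.List.pyGet? s 0 = some "AND" then 1 else 3)
  else if 1 < s.length then
    (if PySem.List.pyGet? s (-1) = some "AND" then f (PySem.List.slice s none (some (-1)))
     else 2 ^ s.length + f (PySem.List.slice s none (some (-1))))
  else 0   -- Python falls through and returns None on the empty list; excluded by Pre_f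
termination_by s.length
decreasing_by
  all_goals
    simp only [PySem.List.slice_to_neg_one, List.length_dropLast]
    omega

-- ===== PORT B =====
def f_alt (s : List String) : Int :=
  match s with
  | [] => 0   -- Source B returns None on the empty list; excluded by Pre_f
  | _ :: _ =>
    let base : Int := if PySem.List.pyGet? s 0 = some "AND" then 1 else 3
    (PySem.List.pyRange 1 s.length 1).foldl
      (fun total i =>
        if PySem.List.pyGet? s i ≠ some "AND" then total + 2 ^ (i + 1).toNat else total)
      base

-- ===== PRECONDITION & SPEC =====
-- Pre_f excludes only the empty list, on which both Pythons return None (not an int).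
def Pre_f (s : List String) : Prop := s ≠ []
instance (s : List String) : Decidable (Pre_f s) := by unfold Pre_f; infer_instance
def pvWitness_f : List String := ["AND", "OR", "AND"]
def Spec_f (s : List String) (out : Int) : Prop := out = f_alt s
instance (s : List String) (out : Int) : Decidable (Spec_f s out) := by unfold Spec_f; infer_instance

-- ===== CLAIM (what is proved, stated in full; the proofs are below) =====
def Claim_equal_f : Prop := ∀ (s : List String), Dom_f s → Pre_f s → Spec_f s (f s)

-- ===== LEMMAS AND PROOFS =====

lemma f_append (xs : List String) (x : String) (h : xs ≠ []) :
    f (xs ++ [x]) = (if x = "AND" then 0 else 2 ^ (xs.length + 1)) + f xs := by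
  rw [f]
  have hlen : (xs ++ [x]).length = xs.length + 1 := by simp
  have hxs : 0 < xs.length := List.length_pos_iff.mpr h
  rw [if_neg (by omega), if_pos (by omega)]
  rw [PySem.List.pyGet?_neg_one_append_singleton, PySem.List.slice_to_neg_one,
      List.dropLast_concat, hlen]
  by_cases hx : x = "AND" <;> simp [hx]

lemma f_alt_append (xs : List String) (x : String) (h : xs ≠ []) :
    f_alt (xs ++ [x]) = (if x = "AND" then 0 else 2 ^ (xs.length + 1)) + f_alt xs := by
  obtain ⟨y, ys, rfl⟩ := List.exists_cons_of_ne_nil h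
  rw [f_alt.eq_def, f_alt.eq_def]
  simp only [List.cons_append, List.length_append, List.length_cons, List.length_nil]
  set n : Nat := ys.length + 1 with hn
  have hL2 : (y :: ys).length = n := by simp [hn]
  have hbase : (if PySem.List.pyGet? (y :: (ys ++ [x])) 0 = some "AND" then (1 : Int) else 3)
      = (if PySem.List.pyGet? (y :: ys) 0 = some "AND" then (1 : Int) else 3) := by
    rw [PySem.List.pyGet?_zero_cons, PySem.List.pyGet?_zero_cons]
  have hrange : PySem.List.pyRange 1 ((n : Int) + 1) 1
      = PySem.List.pyRange 1 (n : Int) 1 ++ [(n : Int)] :=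
    PySem.List.pyRange_one_succ_right (by omega)
  have hcong : ∀ (t : Int) (i : Int), i ∈ PySem.List.pyRange 1 (n : Int) 1 →
      (if PySem.List.pyGet? (y :: (ys ++ [x])) i ≠ some "AND" then t + 2 ^ (i + 1).toNat else t)
      = (if PySem.List.pyGet? (y :: ys) i ≠ some "AND" then t + 2 ^ (i + 1).toNat else t) := by
    intro t i hi
    rw [PySem.List.mem_pyRange_one] at hi
    have h0 : 0 ≤ i := by omega
    have hlt : i.toNat < (y :: ys).length := by simp; omega
    have hsame : PySem.List.pyGet? (y :: (ys ++ [x])) i = PySem.List.pyGet? (y :: ys) i := by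
      rw [PySem.List.pyGet?_of_nonneg _ h0, PySem.List.pyGet?_of_nonneg _ h0]
      exact List.getElem?_append_left hlt
    rw [hsame]
  have hlast : PySem.List.pyGet? (y :: (ys ++ [x])) (n : Int) = some x := by
    have := PySem.List.pyGet?_append_length (pre := y :: ys) (y := x) (ys := [])
    simpa [hL2, List.cons_append] using this
  simp only [Nat.cast_add, Nat.cast_one]
  show List.foldl
        (fun total i =>
          if PySem.List.pyGet? (y :: (ys ++ [x])) i ≠ some "AND" then total + 2 ^ (i + 1).toNat else total)
        (if PySem.List.pyGet? (y :: (ys ++ [x])) 0 = some "AND" then (1 : Int) else 3)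
        (PySem.List.pyRange 1 ((n : Int) + 1) 1)
      = (if x = "AND" then 0 else 2 ^ (n + 1)) +
        List.foldl
          (fun total i =>
            if PySem.List.pyGet? (y :: ys) i ≠ some "AND" then total + 2 ^ (i + 1).toNat else total)
          (if PySem.List.pyGet? (y :: ys) 0 = some "AND" then (1 : Int) else 3)
          (PySem.List.pyRange 1 (n : Int) 1)
  rw [hbase, hrange, List.foldl_append]
  have hfold :
      List.foldl
        (fun total i =>
          if PySem.List.pyGet? (y :: (ys ++ [x])) i ≠ some "AND" then total + 2 ^ (i + 1).toNat else total)
        (if PySem.List.pyGet? (y :: ys) 0 = some "AND" then (1 : Int) else 3)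
        (PySem.List.pyRange 1 (n : Int) 1)
      = List.foldl
        (fun total i =>
          if PySem.List.pyGet? (y :: ys) i ≠ some "AND" then total + 2 ^ (i + 1).toNat else total)
        (if PySem.List.pyGet? (y :: ys) 0 = some "AND" then (1 : Int) else 3)
        (PySem.List.pyRange 1 (n : Int) 1) := PySem.List.foldl_congr_mem _ _ _ _ hcong
  rw [hfold]
  simp only [List.foldl_cons, List.foldl_nil, hlast]
  have hexp : ((n : Int) + 1).toNat = n + 1 := by omega
  by_cases hx : x = "AND"
  · simp [hx]
  · simp only [ne_eq, Option.some.injEq, hx, not_false_eq_true, if_true, hexp]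
    generalize (List.foldl _ _ _ : Int) = T
    simp
    ring

lemma f_eq_alt (s : List String) (h : s ≠ []) : f s = f_alt s := by
  induction s using List.reverseRecOn with
  | nil => exact absurd rfl h
  | append_singleton xs x ih =>
    by_cases hxs : xs = []
    · subst hxs
      rw [f, f_alt.eq_def]
      simp [PySem.List.pyRange_one_eq_nil]
    · rw [f_append xs x hxs, f_alt_append xs x hxs, ih hxs]

-- ===== VERDICT (by name: the statement is the Claim_ definition above) =====
theorem f_spec : Claim_equal_f := by
  intro s _ hpre
  unfold Spec_f
  exact f_eq_alt s hpre
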